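-- pv_equiv track=rewrite | github.com/z843248880/ftp0918 | server/core/listContain.py | listContain
-- ===== SOURCE A (Python) =====
-- def listContain(list1,list2):
--     if len(list1) > len(list2):
--         return False
--     else:
--         for i in range(len(list1)):
--             if list1[i] != list2[i]:
--                 return False
--         else:
--             return True
-- ===== SOURCE B (Python) =====
-- def listContain(list1, list2):
--     return len(list1) <= len(list2) and list1 == list2[:len(list1)]
-- ===== Notes on version B (the rewrite author's own statement) =====
-- stated objective: idiomatic
-- what changed: Replaced the explicit indexed loop with early exit by a length guard plus a single slice-and-compare of the equal-length prefix.
import Mathlib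
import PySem

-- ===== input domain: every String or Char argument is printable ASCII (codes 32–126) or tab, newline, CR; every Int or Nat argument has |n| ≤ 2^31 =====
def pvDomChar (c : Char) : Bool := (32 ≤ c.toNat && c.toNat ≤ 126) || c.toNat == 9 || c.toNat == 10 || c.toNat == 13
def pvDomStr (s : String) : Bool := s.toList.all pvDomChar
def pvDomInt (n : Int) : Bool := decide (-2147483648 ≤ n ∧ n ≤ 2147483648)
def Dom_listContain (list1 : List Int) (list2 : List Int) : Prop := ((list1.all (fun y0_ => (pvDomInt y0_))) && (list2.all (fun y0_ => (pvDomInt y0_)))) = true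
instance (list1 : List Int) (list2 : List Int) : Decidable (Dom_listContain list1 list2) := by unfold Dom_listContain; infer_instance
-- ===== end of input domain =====

-- B replaces A's indexed loop with a length guard plus one prefix-slice comparison (idiomatic).

-- ===== PORT A =====
-- the 'for i in range(len(list1))' loop with early exit, consuming the index list
def listContainLoop (list1 : List Int) (list2 : List Int) : List Nat → Bool
  | [] => true
  | i :: rest =>
      if list1.getD i 0 ≠ list2.getD i 0 then false
      else listContainLoop list1 list2 rest

def listContain (list1 : List Int) (list2 : List Int) : Bool :=
  if list1.length > list2.length then false
  else listContainLoop list1 list2 (List.range list1.length)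

-- ===== PORT B =====
def listContain_alt (list1 : List Int) (list2 : List Int) : Bool :=
  decide (list1.length ≤ list2.length) && (list1 == list2.take list1.length)

-- ===== PRECONDITION & SPEC =====
def Spec_listContain (list1 : List Int) (list2 : List Int) (out : Bool) : Prop := out = listContain_alt list1 list2
instance (list1 : List Int) (list2 : List Int) (out : Bool) : Decidable (Spec_listContain list1 list2 out) := by unfold Spec_listContain; infer_instance

-- ===== CLAIM (what is proved, stated in full; the proofs are below) =====
def Claim_equal_listContain : Prop := ∀ (list1 : List Int) (list2 : List Int), Dom_listContain list1 list2 → Spec_listContain list1 list2 (listContain list1 list2)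

-- ===== LEMMAS AND PROOFS =====
-- the early-exit loop over an index list equals checking all the indices
theorem listContainLoop_eq_all (list1 list2 : List Int) (is : List Nat) :
    listContainLoop list1 list2 is = is.all (fun i => list1.getD i 0 == list2.getD i 0) := by
  induction is with
  | nil => rfl
  | cons i rest ih =>
      simp only [listContainLoop, List.all_cons, ih]
      rw [Bool.eq_iff_iff]
      simp [beq_iff_eq]

theorem listContain_eq_prefix (list1 list2 : List Int) (h : list1.length ≤ list2.length) :
    (List.range list1.length).all (fun i => list1.getD i 0 == list2.getD i 0)
      = (list1 == list2.take list1.length) := by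
  rw [Bool.eq_iff_iff]
  simp only [List.all_eq_true, List.mem_range, beq_iff_eq]
  constructor
  · intro hall
    apply List.ext_getElem
    · simp [Nat.min_eq_left h]
    · intro i h1 h2
      have hi2 : i < list2.length := lt_of_lt_of_le (by simpa using h1) h
      have := hall i (by simpa using h1)
      simpa [List.getD, List.getElem?_eq_getElem, h1, List.getElem?_eq_getElem hi2,
        List.getElem?_eq_getElem (l := list2.take list1.length) h2] using this
  · intro hb i hi
    have h2 : i < (list2.take list1.length).length := by
      simpa [Nat.min_eq_left h] using hi
    have hi2 : i < list2.length := lt_of_lt_of_le hi h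
    have := congrArg (fun l => l.getD i 0) hb
    simpa [List.getD, List.getElem?_eq_getElem, hi, List.getElem?_eq_getElem hi2,
      List.getElem?_eq_getElem h2] using this

-- ===== VERDICT (by name: the statement is the Claim_ definition above) =====
theorem listContain_spec : Claim_equal_listContain := by
  intro list1 list2 _
  unfold Spec_listContain listContain listContain_alt
  by_cases h : list1.length > list2.length
  · simp [h, Nat.not_le.mpr h]
  · have h' : list1.length ≤ list2.length := Nat.le_of_not_lt h
    rw [if_neg h, listContainLoop_eq_all, listContain_eq_prefix _ _ h']
    simp [h']
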